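-- pv_equiv track=rewrite | github.com/Rorbrick/Gloomhaven-Helper | BrownTownHounds-Backend/app/routes.py | SetPartyShopModifier
-- ===== SOURCE A (Python) =====
-- import math
--
-- def SetPartyShopModifier(partyRep):
--     """
--     Calculate shop modifier based on party reputation
--     """
--     sign = math.copysign(1, partyRep)
--     reputation_abs = abs(partyRep)
--
--     shop_thresholds = [(-5, 19), (-4, 15), (-3, 11), (-2, 7), (-1, 3), (0, 0)]
--     for mod, reputation in shop_thresholds:
--         if reputation_abs >= reputation:
--             modifier = mod * sign
--             return (int(modifier))
-- ===== SOURCE B (Python) =====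
-- def SetPartyShopModifier(partyRep):
--     # Closed-form: magnitude = min(5, (|rep|-3)//4 + 1) for |rep|>=3 else 0, signed opposite to rep.
--     sign = -1 if partyRep < 0 else 1
--     r = abs(partyRep)
--     mag = 0 if r < 3 else min(5, (r - 3) // 4 + 1)
--     return -mag * sign
-- ===== Notes on version B (the rewrite author's own statement) =====
-- stated objective: simpler
-- what changed: Replaced the linear scan over the six-entry threshold table with a single closed-form arithmetic expression (capped floor-division) computing the modifier magnitude.
import Mathlib
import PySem

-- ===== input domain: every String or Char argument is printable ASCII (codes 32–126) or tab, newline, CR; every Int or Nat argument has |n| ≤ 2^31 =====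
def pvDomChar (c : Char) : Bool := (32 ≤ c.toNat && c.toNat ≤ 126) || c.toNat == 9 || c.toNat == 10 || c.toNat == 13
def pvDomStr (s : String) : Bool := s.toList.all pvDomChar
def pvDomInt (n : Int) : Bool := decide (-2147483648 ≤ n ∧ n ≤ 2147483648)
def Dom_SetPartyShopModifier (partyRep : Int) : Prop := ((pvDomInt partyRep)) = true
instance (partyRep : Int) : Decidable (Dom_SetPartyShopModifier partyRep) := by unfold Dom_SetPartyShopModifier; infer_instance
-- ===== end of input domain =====

-- ===== PORT A =====
-- A: scan the descending threshold table, return first matching modifier times sign.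
def pvScanA (sign rabs : Int) : List (Int × Int) → Int
  | [] => 0   -- unreachable: table ends with (0,0) and rabs ≥ 0
  | (m, rep) :: rest => if rabs ≥ rep then m * sign else pvScanA sign rabs rest

def SetPartyShopModifier (partyRep : Int) : Int :=
  let sign : Int := if partyRep < 0 then -1 else 1   -- math.copysign(1, n) for int n
  let reputationAbs := |partyRep|
  pvScanA sign reputationAbs [(-5, 19), (-4, 15), (-3, 11), (-2, 7), (-1, 3), (0, 0)]

-- ===== PORT B =====
-- B header: closed-form magnitude instead of a table scan.
def SetPartyShopModifier_alt (partyRep : Int) : Int :=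
  let sign : Int := if partyRep < 0 then -1 else 1
  let r := |partyRep|
  let mag := if r < 3 then 0 else min 5 (PySem.Int.floordiv (r - 3) 4 + 1)
  let res : Int := -mag * sign
  res

-- ===== PRECONDITION & SPEC =====
def Spec_SetPartyShopModifier (partyRep : Int) (out : Int) : Prop := out = SetPartyShopModifier_alt partyRep
instance (partyRep : Int) (out : Int) : Decidable (Spec_SetPartyShopModifier partyRep out) := by unfold Spec_SetPartyShopModifier; infer_instance

-- ===== CLAIM (what is proved, stated in full; the proofs are below) =====
def Claim_equal_SetPartyShopModifier : Prop := ∀ (partyRep : Int), Dom_SetPartyShopModifier partyRep → Spec_SetPartyShopModifier partyRep (SetPartyShopModifier partyRep)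

-- ===== LEMMAS AND PROOFS =====

-- ===== VERDICT (by name: the statement is the Claim_ definition above) =====
theorem SetPartyShopModifier_spec : Claim_equal_SetPartyShopModifier := by
  intro partyRep _
  unfold Spec_SetPartyShopModifier SetPartyShopModifier SetPartyShopModifier_alt
  simp only [pvScanA, PySem.Int.floordiv]
  have hq : (|partyRep| - 3).fdiv 4 = (|partyRep| - 3) / 4 := Int.fdiv_eq_ediv_of_nonneg _ (by norm_num)
  rw [hq]
  have h : |partyRep| = if partyRep < 0 then -partyRep else partyRep := by
    rcases abs_cases partyRep with ⟨h1,h2⟩|⟨h1,h2⟩ <;> simp [h1] <;> omega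
  rw [h]
  split_ifs <;> omega
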